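-- pv_equiv track=rewrite | github.com/hwennnn/leetcode-solutions | problems/compare_strings_by_frequency_of_the_smallest_character/solution.py | numSmallerByFrequency
-- ===== SOURCE A (Python) =====
-- from typing import List
--
-- def numSmallerByFrequency(queries: List[str], words: List[str]) -> List[int]:
--     res, res1, res2 = [], [], []
--
--     def f(word):
--         count = [0] * 26
--         for w in word:
--             count[ord(w) - ord('a')] += 1
--
--         for c in count:
--             if c != 0: return c
--
--         return -1
--
--     for word in queries:
--         res1.append(f(word))
--
--     for word in words:
--         res2.append(f(word))
--
--     for x in res1:
--         count = 0
--         for y in res2: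
--             if y > x:
--                 count += 1
--
--         res.append(count)
--
--     return res
-- ===== SOURCE B (Python) =====
-- def numSmallerByFrequency(queries, words):
--     alphabet = "abcdefghijklmnopqrstuvwxyz"
--
--     # f(s): how often s's alphabetically smallest letter occurs (-1 for the empty string).
--     def f(s):
--         if not s:
--             return -1
--         ranks = [alphabet.index(c) for c in s]
--         return ranks.count(min(ranks))
--
--     wf = sorted(f(w) for w in words)
--     n = len(wf)
--
--     # first index in the sorted wf whose value exceeds x (binary search)
--     def upper_bound(x):
--         lo, hi = 0, n
--         while lo < hi:
--             mid = (lo + hi) // 2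
--             if wf[mid] > x:
--                 hi = mid
--             else:
--                 lo = mid + 1
--         return lo
--
--     return [n - upper_bound(f(q)) for q in queries]
-- ===== Notes on version B (the rewrite author's own statement) =====
-- stated objective: faster
-- what changed: B sorts the words' min-char frequencies once and answers each query by binary search, instead of A's nested query-times-words counting loops.
-- outside the precondition, e.g. on numSmallerByFrequency(['a'], ['Ga']): A returns [1], B raises ValueError; on numSmallerByFrequency([' '], []): A raises IndexError, B raises ValueError
import Mathlib
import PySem

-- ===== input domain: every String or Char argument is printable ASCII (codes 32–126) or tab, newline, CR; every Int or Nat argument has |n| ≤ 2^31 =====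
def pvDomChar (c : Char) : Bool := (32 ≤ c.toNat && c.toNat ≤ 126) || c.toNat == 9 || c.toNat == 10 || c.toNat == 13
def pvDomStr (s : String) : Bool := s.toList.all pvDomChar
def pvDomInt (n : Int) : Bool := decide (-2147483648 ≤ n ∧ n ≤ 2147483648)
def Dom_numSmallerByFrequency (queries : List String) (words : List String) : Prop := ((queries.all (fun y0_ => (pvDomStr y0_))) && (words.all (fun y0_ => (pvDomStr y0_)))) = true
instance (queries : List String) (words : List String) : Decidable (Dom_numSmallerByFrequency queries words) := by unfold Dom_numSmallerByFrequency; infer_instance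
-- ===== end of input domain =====

-- B replaces A's nested queries×words counting loops by sorting the words' min-char
-- frequencies once and answering each query with a binary search (objective: faster).

-- ===== PORT A =====
-- A's helper f: a 26-slot table indexed by ord(c) - 97 (pySetD/pyGetD carry Python's
-- negative-index semantics), then the first nonzero slot, else -1.
def pvA_f (word : String) : Int :=
  let count := word.toList.foldl
    (fun cnt w => PySem.List.pySetD cnt ((w.toNat : Int) - 97)
      (PySem.List.pyGetD cnt ((w.toNat : Int) - 97) 0 + 1))
    (List.replicate 26 (0 : Int))
  match count.find? (fun c => c != 0) with
  | some c => c
  | none => -1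

def numSmallerByFrequency (queries : List String) (words : List String) : List Int :=
  let res1 := queries.foldl (fun acc word => acc ++ [pvA_f word]) []
  let res2 := words.foldl (fun acc word => acc ++ [pvA_f word]) []
  res1.foldl (fun acc x =>
    acc ++ [res2.foldl (fun count y => if y > x then count + 1 else count) (0 : Int)]) []

-- ===== PORT B =====
def pvB_alphabet : List Char := "abcdefghijklmnopqrstuvwxyz".toList

-- B's f: count of the minimal alphabet rank, -1 for the empty string. alphabet.index(c)
-- is ported as PySem.Chars.find, which returns -1 exactly where Python's str.index raises
-- ValueError; those inputs are outside Pre_.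
def pvB_f (s : String) : Int :=
  if s.toList = [] then -1
  else
    let ranks := s.toList.map (fun c => PySem.Chars.find pvB_alphabet [c])
    match PySem.List.min? ranks (fun v => v) with
    | some p => (ranks.count p : Int)
    | none => -1

-- B's binary-search while-loop (fuel = the loop's iteration bound, only to make it
-- structurally total; the branch tests are Source B's): first index in [lo, hi) of the
-- sorted wf whose value exceeds x.
def pvB_upperBoundAux (wf : List Int) (x : Int) : Nat → Int → Int → Int
  | 0, lo, _ => lo
  | fuel + 1, lo, hi =>
    if lo < hi then
      let mid := PySem.Int.floordiv (lo + hi) 2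
      if PySem.List.pyGetD wf mid 0 > x then pvB_upperBoundAux wf x fuel lo mid
      else pvB_upperBoundAux wf x fuel (mid + 1) hi
    else lo

def pvB_upperBound (wf : List Int) (x : Int) (lo hi : Int) : Int :=
  pvB_upperBoundAux wf x (hi - lo).toNat lo hi

def numSmallerByFrequency_alt (queries : List String) (words : List String) : List Int :=
  let wf := PySem.List.sorted (words.map pvB_f) (fun v => v) false
  let n := PySem.List.len wf
  queries.map (fun q => n - pvB_upperBound wf (pvB_f q) 0 n)

-- ===== PRECONDITION & SPEC =====
-- Pre_ excludes inputs with any character outside 'a'..'z', on which a program raises: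
-- B raises ValueError (alphabet.index); A raises IndexError for characters below 'G'
-- (code 71) or above 'z' (code 122), and on characters with codes 71..96 its 26-slot
-- table is indexed negatively, where CPython's wraparound merges them into letter
-- slots — an accident of A's implementation on out-of-alphabet input.
def Pre_numSmallerByFrequency (queries : List String) (words : List String) : Prop :=
  ((queries ++ words).all (fun s => s.toList.all (fun c => 'a' ≤ c && c ≤ 'z'))) = true
instance (queries : List String) (words : List String) : Decidable (Pre_numSmallerByFrequency queries words) := by
  unfold Pre_numSmallerByFrequency; infer_instance

def pvWitness_numSmallerByFrequency : List String × List String := (["aab", "zz"], ["ab", "b", "ccc"])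

def Spec_numSmallerByFrequency (queries : List String) (words : List String) (out : List Int) : Prop := out = numSmallerByFrequency_alt queries words
instance (queries : List String) (words : List String) (out : List Int) : Decidable (Spec_numSmallerByFrequency queries words out) := by unfold Spec_numSmallerByFrequency; infer_instance

-- ===== CLAIM (what is proved, stated in full; the proofs are below) =====
def Claim_equal_numSmallerByFrequency : Prop := ∀ (queries : List String) (words : List String), Dom_numSmallerByFrequency queries words → Pre_numSmallerByFrequency queries words → Spec_numSmallerByFrequency queries words (numSmallerByFrequency queries words)

-- ===== LEMMAS AND PROOFS =====

-- find? returns the first nonzero entry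
theorem pv_find_first_nonzero {l : List Int} {k : Nat} (hk : k < l.length)
    (hb : ∀ j, (hj : j < k) → l[j]'(Nat.lt_trans hj hk) = 0) (h0 : l[k] ≠ 0) :
    l.find? (fun c => c != 0) = some l[k] := by
  induction l generalizing k with
  | nil => simp at hk
  | cons a t ih =>
    cases k with
    | zero =>
      simp only [List.getElem_cons_zero] at h0 ⊢
      rw [List.find?_cons_of_pos (by simpa using h0)]
    | succ k =>
      have ha : a = 0 := by simpa using hb 0 (Nat.succ_pos k)
      rw [List.find?_cons_of_neg (by simp [ha])]
      simp only [List.getElem_cons_succ]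
      exact ih (by simpa using hk) (fun j hj => by simpa using hb (j+1) (by omega)) h0

-- A's count table after the counting loop, slot by slot
theorem pv_table_spec (cs : List Char) (hcs : ∀ c ∈ cs, 97 ≤ c.toNat ∧ c.toNat ≤ 122)
    (cnt : List Int) (hlen : cnt.length = 26) :
    (cs.foldl (fun cnt w => PySem.List.pySetD cnt ((w.toNat : Int) - 97)
        (PySem.List.pyGetD cnt ((w.toNat : Int) - 97) 0 + 1)) cnt).length = 26 ∧
    ∀ i, i < 26 →
      (cs.foldl (fun cnt w => PySem.List.pySetD cnt ((w.toNat : Int) - 97)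
        (PySem.List.pyGetD cnt ((w.toNat : Int) - 97) 0 + 1)) cnt).getD i 0
      = cnt.getD i 0 + (cs.countP (fun c => c.toNat - 97 == i) : Int) := by
  induction cs generalizing cnt with
  | nil => simp [hlen]
  | cons c t ih =>
    have hc := hcs c (by simp)
    have hcast : ((c.toNat : Int) - 97) = ((c.toNat - 97 : Nat) : Int) := by omega
    simp only [List.foldl_cons, hcast, PySem.List.pySetD_natCast, PySem.List.pyGetD_natCast]
    set cnt' := cnt.set (c.toNat - 97) (cnt.getD (c.toNat - 97) 0 + 1) with hcnt'
    have hlen' : cnt'.length = 26 := by simp [hcnt', hlen]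
    obtain ⟨hl, hg⟩ := ih (fun a ha => hcs a (by simp [ha])) cnt' hlen'
    refine ⟨hl, fun i hi => ?_⟩
    rw [hg i hi]
    have hkl : c.toNat - 97 < cnt.length := by omega
    have hgd : cnt'.getD i 0 = if c.toNat - 97 = i then cnt.getD i 0 + 1 else cnt.getD i 0 := by
      simp only [hcnt', List.getD, List.getElem?_set, hkl, if_true]
      split_ifs with hci
      · subst hci; rfl
      · rfl
    rw [hgd, List.countP_cons]
    by_cases hci : c.toNat - 97 = i
    · simp [hci]
      omega
    · simp [hci]

theorem pv_char_le_iff (a b : Char) : a ≤ b ↔ a.toNat ≤ b.toNat := by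
  rw [Char.le_def, UInt32.le_iff_toNat_le]; exact Iff.rfl

theorem pv_char_eq_of_toNat_eq {a b : Char} (h : a.toNat = b.toNat) : a = b :=
  Char.ext (UInt32.toNat_inj.mp h)

-- rank of a lowercase character in the alphabet
theorem pv_rank_eq (c : Char) (h1 : 97 ≤ c.toNat) (h2 : c.toNat ≤ 122) :
    PySem.Chars.find pvB_alphabet [c] = (c.toNat : Int) - 97 := by
  have hc : c = Char.ofNat c.toNat := (Char.ofNat_toNat c).symm
  rw [hc]
  set n := c.toNat with hn
  interval_cases n <;> decide

-- the two per-word helpers agree on lowercase strings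
theorem pv_f_eq (s : String) (h : ∀ c ∈ s.toList, 97 ≤ c.toNat ∧ c.toNat ≤ 122) :
    pvA_f s = pvB_f s := by
  unfold pvA_f pvB_f
  by_cases hne : s.toList = []
  · rw [hne]; rfl
  · rw [if_neg hne]
    -- the smallest character m of s
    cases hm : PySem.List.min? s.toList (fun c => c) with
    | none => exact absurd ((PySem.List.min?_eq_none_iff _ _).mp hm) hne
    | some m =>
    have hmem : m ∈ s.toList := PySem.List.min?_mem hm
    have hmin : ∀ y ∈ s.toList, m ≤ y := PySem.List.min?_isMin hm
    have hmc := h m hmem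
    -- A's side: the first nonzero slot of the table is slot m.toNat - 97, holding count m
    obtain ⟨hlen, hget⟩ := pv_table_spec s.toList h (List.replicate 26 (0 : Int)) (by simp)
    set count := s.toList.foldl
      (fun cnt w => PySem.List.pySetD cnt ((w.toNat : Int) - 97)
        (PySem.List.pyGetD cnt ((w.toNat : Int) - 97) 0 + 1))
      (List.replicate 26 (0 : Int)) with hcount
    have hkm : m.toNat - 97 < 26 := by omega
    have hkm' : m.toNat - 97 < count.length := by omega
    have hval : count.getD (m.toNat - 97) 0 = (s.toList.count m : Int) := by
      rw [hget _ hkm]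
      have : s.toList.countP (fun c => c.toNat - 97 == m.toNat - 97) = s.toList.count m := by
        apply List.countP_congr
        intro a ha
        have hac := h a ha
        constructor
        · intro hb
          have hb' : a.toNat - 97 = m.toNat - 97 := by simpa using hb
          have ham : a = m := pv_char_eq_of_toNat_eq (by omega)
          simp [ham]
        · intro hb
          have ham : a = m := by simpa using hb
          simp [ham]
      rw [this]
      have hrep : (List.replicate 26 (0:Int)).getD (m.toNat - 97) 0 = 0 := by
        show ((List.replicate 26 (0:Int))[m.toNat - 97]?).getD 0 = 0
        rw [List.getElem?_replicate]; split <;> rfl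
      rw [hrep, zero_add]
    have hzero : ∀ j, j < m.toNat - 97 → count.getD j 0 = 0 := by
      intro j hj
      rw [hget j (by omega)]
      have : s.toList.countP (fun c => c.toNat - 97 == j) = 0 := by
        rw [List.countP_eq_zero]
        intro a ha
        have hac := h a ha
        have : m.toNat ≤ a.toNat := (pv_char_le_iff m a).mp (hmin a ha)
        simp; omega
      rw [this]
      have hrep : (List.replicate 26 (0:Int)).getD j 0 = 0 := by
        show ((List.replicate 26 (0:Int))[j]?).getD 0 = 0
        rw [List.getElem?_replicate]; split <;> rfl
      rw [hrep, zero_add]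
      simp
    have hfind : count.find? (fun c => c != 0) = some (count[m.toNat - 97]'hkm') := by
      apply pv_find_first_nonzero
      · intro j hj
        rw [← List.getD_eq_getElem count 0 (by omega)]
        exact hzero j hj
      · rw [← List.getD_eq_getElem count 0 hkm', hval]
        have : 0 < s.toList.count m := List.count_pos_iff.mpr hmem
        omega
    -- B's side: the ranks are c.toNat - 97 and the minimal rank is m's
    have hpos : s.toList.map (fun c => PySem.Chars.find pvB_alphabet [c])
        = s.toList.map (fun c => (c.toNat : Int) - 97) :=
      List.map_congr_left (fun c hc => pv_rank_eq c (h c hc).1 (h c hc).2)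
    cases hp : PySem.List.min? (s.toList.map (fun c => PySem.Chars.find pvB_alphabet [c])) (fun v => v) with
    | none =>
      have : s.toList.map (fun c => PySem.Chars.find pvB_alphabet [c]) = [] :=
        (PySem.List.min?_eq_none_iff _ _).mp hp
      simp only [List.map_eq_nil_iff] at this
      exact absurd this hne
    | some p =>
    have hpmem : p ∈ s.toList.map (fun c => PySem.Chars.find pvB_alphabet [c]) :=
      PySem.List.min?_mem hp
    have hpmin : ∀ r ∈ s.toList.map (fun c => PySem.Chars.find pvB_alphabet [c]), p ≤ r :=
      PySem.List.min?_isMin hp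
    have hpm : p = (m.toNat : Int) - 97 := by
      rw [hpos] at hpmem
      obtain ⟨c0, hc0, hc0p⟩ := List.mem_map.mp hpmem
      have h1 : p ≤ (m.toNat : Int) - 97 := by
        apply hpmin
        rw [hpos]
        exact List.mem_map.mpr ⟨m, hmem, rfl⟩
      have h2 : m.toNat ≤ c0.toNat := (pv_char_le_iff m c0).mp (hmin c0 hc0)
      omega
    have hcnt : (s.toList.map (fun c => PySem.Chars.find pvB_alphabet [c])).count p
        = s.toList.count m := by
      rw [hpos]
      unfold List.count
      rw [List.countP_map]
      apply List.countP_congr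
      intro a ha
      have hac := h a ha
      constructor
      · intro hb
        have hb' : (a.toNat : Int) - 97 = p := by simpa using hb
        have ham : a = m := pv_char_eq_of_toNat_eq (by omega)
        simp [ham]
      · intro hb
        have ham : a = m := by simpa using hb
        simp [ham, hpm]
    simp only [hp]
    show (match count.find? (fun c => c != 0) with | some c => c | none => -1)
      = (((s.toList.map (fun c => PySem.Chars.find pvB_alphabet [c])).count p : Nat) : Int)
    rw [hfind]
    show count[m.toNat - 97]'hkm' = (((s.toList.map (fun c => PySem.Chars.find pvB_alphabet [c])).count p : Nat) : Int)
    rw [← List.getD_eq_getElem count 0 hkm', hval, hcnt]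

-- elements ≤ x form a prefix of a ≤-sorted list
theorem pv_sorted_prefix (l : List Int) (hp : l.Pairwise (· ≤ ·)) (x : Int) :
    ∀ i, (hi : i < l.length) → (l[i] ≤ x ↔ i < l.countP (fun y => decide (y ≤ x))) := by
  induction l with
  | nil => intro i hi; simp at hi
  | cons a t ih =>
    rw [List.pairwise_cons] at hp
    obtain ⟨ha, hpt⟩ := hp
    intro i hi
    by_cases hax : a ≤ x
    · rw [List.countP_cons_of_pos (by simpa using hax)]
      cases i with
      | zero => simpa using hax
      | succ j =>
        simp only [List.getElem_cons_succ]
        rw [ih hpt j (by simpa using hi)]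
        omega
    · have hnone : ∀ y ∈ a :: t, ¬ y ≤ x := by
        intro y hy
        rcases List.mem_cons.mp hy with rfl | hyt
        · exact hax
        · intro hyx; exact hax (le_trans (ha y hyt) hyx)
      have hc : (a :: t).countP (fun y => decide (y ≤ x)) = 0 := by
        rw [List.countP_eq_zero]
        intro y hy; simpa using hnone y hy
      rw [hc]
      simp only [Nat.not_lt_zero, iff_false]
      exact fun hle => hnone _ (List.getElem_mem hi) hle

-- B's binary search returns the number of elements ≤ x of the sorted list
theorem pv_upperBoundAux_eq (wf : List Int) (x : Int) (hp : wf.Pairwise (· ≤ ·)) :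
    ∀ (fuel : Nat) (lo hi : Int), (hi - lo).toNat ≤ fuel → 0 ≤ lo → hi ≤ wf.length →
    lo ≤ (wf.countP (fun y => decide (y ≤ x)) : Int) →
    (wf.countP (fun y => decide (y ≤ x)) : Int) ≤ hi →
    pvB_upperBoundAux wf x fuel lo hi = (wf.countP (fun y => decide (y ≤ x)) : Int) := by
  intro fuel
  induction fuel with
  | zero =>
    intro lo hi hf h0 hh hK1 hK2
    simp only [pvB_upperBoundAux]
    omega
  | succ fuel ih =>
    intro lo hi hf h0 hh hK1 hK2
    simp only [pvB_upperBoundAux]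
    split_ifs with h hgt
    · -- wf[mid] > x : recurse on [lo, mid)
      have hb := PySem.Int.floordiv_two_mid_bounds (lo := lo) (hi := hi) (le_of_lt h)
      have hmidlt : PySem.Int.floordiv (lo + hi) 2 < hi := by
        rw [PySem.Int.floordiv_lt_iff_lt_mul (by omega)]; omega
      set mid := PySem.Int.floordiv (lo + hi) 2 with hmid
      have hmlen : mid.toNat < wf.length := by omega
      have hKmid : (wf.countP (fun y => decide (y ≤ x)) : Int) ≤ mid := by
        by_contra hcon
        have hmk : mid.toNat < wf.countP (fun y => decide (y ≤ x)) := by omega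
        have := (pv_sorted_prefix wf hp x mid.toNat hmlen).mpr hmk
        have hgeq : PySem.List.pyGetD wf mid 0 = wf[mid.toNat]'hmlen :=
          PySem.List.pyGetD_eq_getElem wf 0 (by omega) (by omega)
        rw [hgeq] at hgt
        omega
      exact ih lo mid (by omega) h0 (by omega) hK1 hKmid
    · -- wf[mid] ≤ x : recurse on [mid+1, hi)
      have hb := PySem.Int.floordiv_two_mid_bounds (lo := lo) (hi := hi) (le_of_lt h)
      have hmidlt : PySem.Int.floordiv (lo + hi) 2 < hi := by
        rw [PySem.Int.floordiv_lt_iff_lt_mul (by omega)]; omega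
      set mid := PySem.Int.floordiv (lo + hi) 2 with hmid
      have hmlen : mid.toNat < wf.length := by omega
      have hKmid : mid + 1 ≤ (wf.countP (fun y => decide (y ≤ x)) : Int) := by
        have hgeq : PySem.List.pyGetD wf mid 0 = wf[mid.toNat]'hmlen :=
          PySem.List.pyGetD_eq_getElem wf 0 (by omega) (by omega)
        rw [hgeq] at hgt
        have hmk : mid.toNat < wf.countP (fun y => decide (y ≤ x)) :=
          (pv_sorted_prefix wf hp x mid.toNat hmlen).mp (by omega)
        omega
      exact ih (mid + 1) hi (by omega) (by omega) hh hKmid hK2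
    · omega

theorem pv_upperBound_eq (wf : List Int) (x : Int) (hp : wf.Pairwise (· ≤ ·))
    (lo hi : Int) (h0 : 0 ≤ lo) (hh : hi ≤ wf.length)
    (hK1 : lo ≤ (wf.countP (fun y => decide (y ≤ x)) : Int))
    (hK2 : (wf.countP (fun y => decide (y ≤ x)) : Int) ≤ hi) :
    pvB_upperBound wf x lo hi = (wf.countP (fun y => decide (y ≤ x)) : Int) :=
  pv_upperBoundAux_eq wf x hp (hi - lo).toNat lo hi (le_refl _) h0 hh hK1 hK2

-- ===== VERDICT (by name: the statement is the Claim_ definition above) =====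
theorem numSmallerByFrequency_spec : Claim_equal_numSmallerByFrequency := by
  intro queries words hdom hpre
  unfold Spec_numSmallerByFrequency
  have hlow : ∀ s ∈ queries ++ words, ∀ c ∈ s.toList, 97 ≤ c.toNat ∧ c.toNat ≤ 122 := by
    intro s hs c hc
    unfold Pre_numSmallerByFrequency at hpre
    simp only [List.all_eq_true] at hpre
    have h2 := hpre s hs c hc
    simp only [Bool.and_eq_true, decide_eq_true_eq] at h2
    exact ⟨(pv_char_le_iff 'a' c).mp h2.1, (pv_char_le_iff c 'z').mp h2.2⟩
  have hq : ∀ s ∈ queries, pvA_f s = pvB_f s :=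
    fun s hs => pv_f_eq s (hlow s (List.mem_append_left _ hs))
  have hw : words.map pvA_f = words.map pvB_f :=
    List.map_congr_left (fun s hs => pv_f_eq s (hlow s (List.mem_append_right _ hs)))
  simp only [numSmallerByFrequency, numSmallerByFrequency_alt,
    PySem.List.foldl_append_singleton_eq_map, List.nil_append,
    PySem.List.foldl_ite_add_one, zero_add, List.map_map, PySem.List.len_eq]
  apply List.map_congr_left
  intro q hqm
  rw [hw, Function.comp_apply, hq q hqm]
  set x := pvB_f q with hx
  set L := words.map pvB_f with hL
  set wf := PySem.List.sorted L (fun v => v) false with hwf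
  have hperm : wf.Perm L := PySem.List.sorted_perm L (fun v => v) false
  have hpair : wf.Pairwise (· ≤ ·) := PySem.List.sorted_pairwise L (fun v => v)
  have hlenp : wf.length = L.length := hperm.length_eq
  have hub := pv_upperBound_eq wf x hpair 0 wf.length (le_refl 0)
    (le_refl _) (by positivity) (by exact_mod_cast List.countP_le_length)
  rw [hub]
  have hsplit : wf.countP (fun y => decide (y > x)) + wf.countP (fun y => decide (y ≤ x)) = wf.length := by
    have hlc := List.length_eq_countP_add_countP (l := wf) (p := fun y => decide (y > x))
    have hcc : wf.countP (fun y => decide ¬(decide (y > x) = true)) = wf.countP (fun y => decide (y ≤ x)) := by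
      apply List.countP_congr
      intro a _
      constructor
      · intro hb; simp at hb ⊢; omega
      · intro hb; simp at hb ⊢; omega
    omega
  have hcp : L.countP (fun y => decide (y > x)) = wf.countP (fun y => decide (y > x)) :=
    (hperm.countP_eq _).symm
  omega
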